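-- pv_equiv track=rewrite | github.com/JKniager/DiceStatisticsCalculator | dice_statistic_calculator/DiceStatCalculator.py | formula_split
-- ===== SOURCE A (Python) =====
-- from typing import List, Tuple
--
-- class BadFormulaFormatError(Exception):
--     def __init__(self, *args: object) -> None:
--         super().__init__(*args)
--
-- def formula_split(f: str) -> List[str]:
--     working_string = "".join(f.split())
--     working_string = working_string.replace(",", "")
--
--     out = []
--     num_string = ""
--     decimal_last = False
--     for c in working_string:
--         if c.isdigit():
--             num_string += c
--             decimal_last = False
--         elif c == '.':
--             if decimal_last:
--                 raise BadFormulaFormatError("Two decimal points found next to each other!")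
--             num_string += c
--             decimal_last = True
--         elif len(num_string) > 0:
--             out.append(num_string)
--             num_string = ""
--             out.append(c.lower())
--
--     if len(num_string) > 0:
--         out.append(num_string)
--
--     return out
-- ===== SOURCE B (Python) =====
-- def formula_split(f):
--     s = "".join(f.split()).replace(",", "")
--     out = []
--     i, n = 0, len(s)
--     while i < n:
--         c = s[i]
--         if c.isdigit() or c == '.':
--             j = i + 1
--             while j < n and (s[j].isdigit() or s[j] == '.'):
--                 j += 1
--             out.append(s[i:j])
--             if j < n:
--                 out.append(s[j].lower())
--             i = j + 1
--         else:
--             i += 1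
--     return out
-- ===== Notes on version B (the rewrite author's own statement) =====
-- stated objective: simpler
-- what changed: Replaces A's char-by-char state machine (num_string accumulator + decimal_last flag) with an index/slice scanner that slices out each maximal digit/dot run and emits it with the single character that follows; B drops the '..' validation, so it returns tokens where A raises (excluded by Pre_).
-- outside the precondition, e.g. on formula_split('..'): A raises BadFormulaFormatError, B returns ['..']; on formula_split('1.+.2'): A raises BadFormulaFormatError, B returns ['1.', '+', '.2']
import Mathlib
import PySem

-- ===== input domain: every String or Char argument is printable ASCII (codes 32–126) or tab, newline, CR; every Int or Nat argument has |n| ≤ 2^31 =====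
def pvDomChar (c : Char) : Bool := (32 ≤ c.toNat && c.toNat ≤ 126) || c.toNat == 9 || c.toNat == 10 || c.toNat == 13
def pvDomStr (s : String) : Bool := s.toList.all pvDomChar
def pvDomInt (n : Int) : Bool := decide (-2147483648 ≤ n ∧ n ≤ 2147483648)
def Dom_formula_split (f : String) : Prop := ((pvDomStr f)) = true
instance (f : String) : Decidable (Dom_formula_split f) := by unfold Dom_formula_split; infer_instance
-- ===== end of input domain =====

-- B replaces A's char-by-char accumulator state machine by an index/slice scanner that emits each
-- maximal digit/dot run and the single character following it (objective: simpler). Where A raises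
-- BadFormulaFormatError (two decimal points with no digit between them), B returns the tokens instead;
-- those inputs are outside Pre_.

-- shared cleaning step: both Pythons begin with  "".join(f.split()).replace(",", "")
def pvCleaned (f : String) : List Char :=
  (PySem.Str.replace (PySem.Str.join "" (PySem.Str.split₀ f)) "," "").toList

-- ===== PORT A =====
-- the for-loop with state (out, num_string, decimal_last); `none` = BadFormulaFormatError
def formulaLoopA : List Char → List String → List Char → Bool → Option (List String × List Char)
  | [], out, num, _ => some (out, num)
  | c :: cs, out, num, declast =>
    if PySem.Chars.isdigit c then formulaLoopA cs out (num ++ [c]) false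
    else if c = '.' then
      if declast then none
      else formulaLoopA cs out (num ++ [c]) true
    else if num.length > 0 then
      formulaLoopA cs (out ++ [String.mk num, String.mk (PySem.Chars.lower [c])]) [] declast
    else formulaLoopA cs out num declast

-- the tail of A: `none` (= BadFormulaFormatError, excluded by Pre_) yields [], else flush num_string
def formulaFinishA : Option (List String × List Char) → List String
  | none => []
  | some (out, num) => if num.length > 0 then out ++ [String.mk num] else out

def formula_split (f : String) : List String :=
  formulaFinishA (formulaLoopA (pvCleaned f) [] [] false)

-- ===== PORT B =====
def pvNumChar (c : Char) : Bool := PySem.Chars.isdigit c || c == '.'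

-- the while-loop over indices: at a digit/dot, slice out the maximal run s[i:j], then emit s[j].lower()
def formulaLoopB : List Char → List String
  | [] => []
  | c :: cs =>
    if pvNumChar c then
      match h : cs.dropWhile pvNumChar with
      | [] => [String.mk (c :: cs.takeWhile pvNumChar)]
      | d :: rest =>
        String.mk (c :: cs.takeWhile pvNumChar) :: String.mk (PySem.Chars.lower [d]) ::
          formulaLoopB rest
    else formulaLoopB cs
termination_by l => l.length
decreasing_by
  · have h1 : (cs.dropWhile pvNumChar).length ≤ cs.length := List.length_dropWhile_le _ _
    rw [h] at h1
    simp at h1 ⊢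
    omega
  · simp

def formula_split_alt (f : String) : List String :=
  formulaLoopB (pvCleaned f)

-- ===== PRECONDITION & SPEC =====
-- Pre_ excludes exactly the inputs on which A raises BadFormulaFormatError: those whose string,
-- after removing whitespace and commas and then every character other than digits and decimal points,
-- contains two adjacent decimal points. A returns no value there (it raises), B returns the tokens.
def Pre_formula_split (f : String) : Prop :=
  List.IsChain (fun a b => ¬(a = '.' ∧ b = '.'))
    (((f.toList.filter (fun c => !PySem.Chars.isspace c)).filter (fun c => !(c == ','))).filter
      (fun c => PySem.Chars.isdigit c || c == '.'))
instance (f : String) : Decidable (Pre_formula_split f) := by unfold Pre_formula_split; infer_instance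

def pvWitness_formula_split : String := "3d6 + 2,000"

def Spec_formula_split (f : String) (out : List String) : Prop := out = formula_split_alt f
instance (f : String) (out : List String) : Decidable (Spec_formula_split f out) := by unfold Spec_formula_split; infer_instance

-- ===== CLAIM (what is proved, stated in full; the proofs are below) =====
def Claim_equal_formula_split : Prop := ∀ (f : String), Dom_formula_split f → Pre_formula_split f → Spec_formula_split f (formula_split f)

-- ===== LEMMAS AND PROOFS =====

-- the cleaned string is exactly the whitespace-and-comma-free subsequence of f
lemma pv_join_nil (l : List (List Char)) : PySem.Chars.join [] l = l.flatten := by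
  induction l with
  | nil => simp [PySem.Chars.join, List.intercalate]
  | cons x xs ih => cases xs <;> simp_all [PySem.Chars.join, List.intercalate, List.intersperse]

lemma pv_split_go (l cur : List Char) (acc : List (List Char)) :
    (PySem.Chars.split₀.go l cur acc).flatten =
      acc.reverse.flatten ++ cur.reverse ++ l.filter (fun c => !PySem.Chars.isspace c) := by
  induction l generalizing cur acc with
  | nil =>
    rw [PySem.Chars.split₀.go.eq_def]
    by_cases h : cur = [] <;> simp [h]
  | cons c rest ih =>
    rw [PySem.Chars.split₀.go.eq_def]
    by_cases hs : PySem.Chars.isspace c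
    · by_cases h : cur = [] <;> simp [hs, h, ih]
    · simp [hs, ih]

lemma pv_join_split (l : List Char) :
    PySem.Chars.join [] (PySem.Chars.split₀ l) = l.filter (fun c => !PySem.Chars.isspace c) := by
  rw [pv_join_nil, PySem.Chars.split₀, pv_split_go]; simp

lemma pv_replace_go (fuel : Nat) (l acc : List Char) (hf : l.length ≤ fuel) :
    PySem.Chars.replace.go [','] [] fuel l acc =
      acc.reverse ++ l.filter (fun c => !(c == ',')) := by
  induction fuel generalizing l acc with
  | zero =>
    rw [PySem.Chars.replace.go.eq_def]
    interval_cases h : l.length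
    · simp [List.length_eq_zero_iff.mp h]
  | succ n ih =>
    rw [PySem.Chars.replace.go.eq_def]
    cases l with
    | nil => simp
    | cons c t =>
      by_cases hc : c = ','
      · subst hc
        have : List.isPrefixOf [','] (',' :: t) = true := by simp [List.isPrefixOf]
        simp only [this, if_pos]
        have hdrop : List.drop [','].length (',' :: t) = t := rfl
        rw [hdrop, ih t _ (by simpa using hf)]
        simp
      · have : List.isPrefixOf [','] (c :: t) = false := by
          simp [List.isPrefixOf]; exact fun h => (hc h.symm).elim
        simp only [this, Bool.false_eq_true, if_neg, not_false_iff]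
        rw [ih t _ (by simpa using hf)]
        simp [hc]

lemma pv_replace_comma (l : List Char) :
    PySem.Chars.replace l [','] [] = l.filter (fun c => !(c == ',')) := by
  rw [PySem.Chars.replace]
  simp only [List.isEmpty_cons, if_neg, Bool.false_eq_true, not_false_iff]
  rw [pv_replace_go l.length l [] le_rfl]
  simp

lemma pv_cleaned_eq (f : String) :
    pvCleaned f =
      (f.toList.filter (fun c => !PySem.Chars.isspace c)).filter (fun c => !(c == ',')) := by
  unfold pvCleaned
  rw [PySem.Str.toList_replace, PySem.Str.toList_join, PySem.Str.split₀_map_toList]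
  have h1 : ("" : String).toList = [] := rfl
  have h2 : ("," : String).toList = [','] := rfl
  rw [h1, h2, pv_join_split, pv_replace_comma]

-- the decimal_last discipline: no two dots with no digit between, as a recursive Bool over the cleaned chars
def pvNoDD : Bool → List Char → Bool
  | _, [] => true
  | d, c :: cs =>
    if PySem.Chars.isdigit c then pvNoDD false cs
    else if c = '.' then !d && pvNoDD true cs
    else pvNoDD d cs

lemma pv_noDD_of_chain (cs : List Char) (d : Bool)
    (h : List.IsChain (fun a b => ¬(a = '.' ∧ b = '.'))
      ((if d then ['.'] else []) ++ cs.filter (fun c => PySem.Chars.isdigit c || c == '.'))) :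
    pvNoDD d cs = true := by
  induction cs generalizing d with
  | nil => rfl
  | cons c cs ih =>
    by_cases hd : PySem.Chars.isdigit c
    · have hfc : List.filter (fun x => PySem.Chars.isdigit x || x == '.') (c :: cs)
          = c :: List.filter (fun x => PySem.Chars.isdigit x || x == '.') cs := by
        simp [List.filter_cons, hd]
      rw [hfc] at h
      have h2 : List.IsChain (fun a b => ¬(a = '.' ∧ b = '.'))
          (((if d then ['.'] else []) ++ [c]) ++
            List.filter (fun x => PySem.Chars.isdigit x || x == '.') cs) := by
        simpa [List.append_assoc] using h
      have hx : pvNoDD false cs = true := ih false h2.right_of_append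
      simp [pvNoDD, hd, hx]
    · by_cases hc : c = '.'
      · subst hc
        have hfc : List.filter (fun x => PySem.Chars.isdigit x || x == '.') ('.' :: cs)
            = '.' :: List.filter (fun x => PySem.Chars.isdigit x || x == '.') cs := by
          simp [List.filter_cons]
        rw [hfc] at h
        cases d with
        | true =>
          have h2 : List.IsChain (fun a b => ¬(a = '.' ∧ b = '.'))
              ('.' :: '.' :: List.filter (fun x => PySem.Chars.isdigit x || x == '.') cs) := by
            simpa using h
          exact absurd ⟨rfl, rfl⟩ (List.isChain_cons_cons.mp h2).1
        | false =>
          have hx : pvNoDD true cs = true := ih true (by simpa using h)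
          simp [pvNoDD, hd, hx]
      · have hfc : List.filter (fun x => PySem.Chars.isdigit x || x == '.') (c :: cs)
            = List.filter (fun x => PySem.Chars.isdigit x || x == '.') cs := by
          simp [List.filter_cons, hd, hc]
        rw [hfc] at h
        have hx : pvNoDD d cs = true := ih d h
        simp [pvNoDD, hd, hc, hx]

-- one step of B's scanner
lemma pv_loopB_cons_num (c : Char) (cs : List Char) (hnc : pvNumChar c = true) :
    formulaLoopB (c :: cs) =
      String.mk (c :: cs.takeWhile pvNumChar) ::
        (match cs.dropWhile pvNumChar with
         | [] => []
         | d :: rest => String.mk (PySem.Chars.lower [d]) :: formulaLoopB rest) := by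
  rw [formulaLoopB.eq_def]
  simp only [hnc, if_pos]
  split <;> simp [*]

lemma pv_loopB_cons_op (c : Char) (cs : List Char) (hnc : pvNumChar c = false) :
    formulaLoopB (c :: cs) = formulaLoopB cs := by
  rw [formulaLoopB.eq_def]
  simp [hnc]

-- main loop correspondence: A's state machine, finished off, equals B's run scanner
lemma pv_loopAB (cs : List Char) (out : List String) (num : List Char) (declast : Bool)
    (h : pvNoDD declast cs = true) :
    formulaFinishA (formulaLoopA cs out num declast) =
    out ++ (if num.length > 0 then
              String.mk (num ++ cs.takeWhile pvNumChar) ::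
                (match cs.dropWhile pvNumChar with
                 | [] => []
                 | d :: rest => String.mk (PySem.Chars.lower [d]) :: formulaLoopB rest)
            else formulaLoopB cs) := by
  induction cs generalizing out num declast with
  | nil =>
    by_cases hn : num = []
    · simp [formulaLoopA, formulaFinishA, hn, formulaLoopB]
    · simp [formulaLoopA, formulaFinishA, List.length_pos_iff.mpr hn]
  | cons c cs ih =>
    by_cases hd : PySem.Chars.isdigit c
    · -- digit: extend the current run
      have hnc : pvNumChar c = true := by simp [pvNumChar, hd]
      have h' : pvNoDD false cs = true := by simpa [pvNoDD, hd] using h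
      rw [show formulaLoopA (c :: cs) out num declast = formulaLoopA cs out (num ++ [c]) false from
        by simp [formulaLoopA, hd]]
      rw [ih out (num ++ [c]) false h', if_pos (by simp)]
      by_cases hn : num = []
      · subst hn
        simp [pv_loopB_cons_num c cs hnc, List.takeWhile_cons, List.dropWhile_cons, hnc]
      · rw [if_pos (List.length_pos_iff.mpr hn)]
        simp [List.takeWhile_cons, List.dropWhile_cons, hnc]
    · by_cases hc : c = '.'
      · -- dot: also extends the run (raise case excluded by pvNoDD)
        subst hc
        have hnc : pvNumChar '.' = true := rfl
        have hdl : declast = false ∧ pvNoDD true cs = true := by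
          cases declast <;> simpa [pvNoDD, hd] using h
        obtain ⟨hdl0, h'⟩ := hdl
        subst hdl0
        rw [show formulaLoopA ('.' :: cs) out num false = formulaLoopA cs out (num ++ ['.']) true
          from by simp [formulaLoopA, show PySem.Chars.isdigit '.' = false from rfl]]
        rw [ih out (num ++ ['.']) true h', if_pos (by simp)]
        by_cases hn : num = []
        · subst hn
          simp [pv_loopB_cons_num '.' cs hnc, List.takeWhile_cons, List.dropWhile_cons, hnc]
        · rw [if_pos (List.length_pos_iff.mpr hn)]
          simp [List.takeWhile_cons, List.dropWhile_cons, hnc]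
      · -- operator: flush the run (if any) and emit the lowered operator
        have hnc : pvNumChar c = false := by simp [pvNumChar, hd, hc]
        have h' : pvNoDD declast cs = true := by simpa [pvNoDD, hd, hc] using h
        have hB : formulaLoopB (c :: cs) = formulaLoopB cs := pv_loopB_cons_op c cs hnc
        by_cases hn : num = []
        · subst hn
          rw [show formulaLoopA (c :: cs) out [] declast = formulaLoopA cs out [] declast from
            by simp [formulaLoopA, hd, hc]]
          rw [ih out [] declast h']
          simp [hB]
        · rw [show formulaLoopA (c :: cs) out num declast =
              formulaLoopA cs (out ++ [String.mk num, String.mk (PySem.Chars.lower [c])]) [] declast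
            from by simp [formulaLoopA, hd, hc, List.length_pos_iff.mpr hn]]
          rw [ih (out ++ [String.mk num, String.mk (PySem.Chars.lower [c])]) [] declast h']
          rw [if_pos (List.length_pos_iff.mpr hn)]
          simp [List.takeWhile_cons, List.dropWhile_cons, hnc]

lemma pv_noDD_of_chain' (cs : List Char)
    (h : List.IsChain (fun a b => ¬(a = '.' ∧ b = '.'))
      (cs.filter (fun c => PySem.Chars.isdigit c || c == '.'))) :
    pvNoDD false cs = true :=
  pv_noDD_of_chain cs false (by simpa using h)

-- ===== VERDICT (by name: the statement is the Claim_ definition above) =====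
theorem formula_split_spec : Claim_equal_formula_split := by
  intro f _ hpre
  unfold Pre_formula_split at hpre
  rw [← pv_cleaned_eq f] at hpre
  have hnodd : pvNoDD false (pvCleaned f) = true := pv_noDD_of_chain' (pvCleaned f) hpre
  unfold Spec_formula_split formula_split formula_split_alt
  have h2 := pv_loopAB (pvCleaned f) [] [] false hnodd
  rw [List.nil_append, if_neg (by decide : ¬([] : List Char).length > 0)] at h2
  exact h2
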